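-- pv_equiv track=rewrite | github.com/VerstraeteBert/algos-ds | test/vraag4/src/yahtzee/96.py | histogram
-- ===== SOURCE A (Python) =====
-- def histogram(ogen):
--     hist = {}
--     for i in sorted(ogen):
--         if not i in hist:
--             hist[i] = 1
--         else:
--             hist[i] += 1
--     return hist
-- ===== SOURCE B (Python) =====
-- from itertools import groupby
--
--
-- def histogram(ogen):
--     return {key: sum(1 for _ in grp) for key, grp in groupby(sorted(ogen))}
-- ===== Notes on version B (the rewrite author's own statement) =====
-- stated objective: idiomatic
-- what changed: Replaces the membership-test-and-increment dict accumulator loop with itertools.groupby over the sorted input: each run of equal values is folded to one (key, run-length) pair in a dict comprehension, so no running dict is maintained.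
import Mathlib
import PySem

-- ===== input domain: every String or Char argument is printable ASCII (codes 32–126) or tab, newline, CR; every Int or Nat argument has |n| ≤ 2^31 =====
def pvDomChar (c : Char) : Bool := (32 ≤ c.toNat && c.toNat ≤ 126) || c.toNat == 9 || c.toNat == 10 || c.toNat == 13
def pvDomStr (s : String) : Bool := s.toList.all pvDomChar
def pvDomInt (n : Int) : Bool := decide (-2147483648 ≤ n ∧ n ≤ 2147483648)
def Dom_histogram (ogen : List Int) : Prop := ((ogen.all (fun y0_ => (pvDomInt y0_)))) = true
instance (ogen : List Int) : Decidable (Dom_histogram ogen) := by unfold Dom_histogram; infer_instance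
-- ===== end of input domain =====

-- B replaces A's membership-test-and-increment dict loop with a groupby-style run-length
-- pass over the sorted list (objective: idiomatic; same return value).

-- ===== PORT A =====
-- the loop body: 'if not i in hist: hist[i] = 1 else: hist[i] += 1'
def pyStep (d : PySem.Dict Int Int) (i : Int) : PySem.Dict Int Int :=
  if d.contains i = false then d.insert i 1 else d.insert i (d.getD i 0 + 1)

def histogram (ogen : List Int) : List (Int × Int) :=
  ((PySem.List.sorted ogen (fun x => x) false).foldl pyStep PySem.Dict.empty).items

-- ===== PORT B =====
-- port of itertools.groupby over a list of Ints, each group folded to its length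
-- (key, sum(1 for _ in grp)): runsAux k c s scans s extending the current run (k, c)
def runsAux : Int → Int → List Int → List (Int × Int)
  | k, c, [] => [(k, c)]
  | k, c, y :: ys => if y = k then runsAux k (c + 1) ys else (k, c) :: runsAux y 1 ys

def runs : List Int → List (Int × Int)
  | [] => []
  | x :: xs => runsAux x 1 xs

-- the dict comprehension over the (key, run-length) pairs
def histogram_alt (ogen : List Int) : List (Int × Int) :=
  ((runs (PySem.List.sorted ogen (fun x => x) false)).foldl
      (fun d p => d.insert p.1 p.2) (PySem.Dict.empty : PySem.Dict Int Int)).items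

-- ===== PRECONDITION & SPEC =====
def Spec_histogram (ogen : List Int) (out : List (Int × Int)) : Prop := out = histogram_alt ogen
instance (ogen : List Int) (out : List (Int × Int)) : Decidable (Spec_histogram ogen out) := by unfold Spec_histogram; infer_instance

-- ===== CLAIM (what is proved, stated in full; the proofs are below) =====
def Claim_equal_histogram : Prop := ∀ (ogen : List Int), Dom_histogram ogen → Spec_histogram ogen (histogram ogen)

-- ===== LEMMAS AND PROOFS =====

-- every key produced by runsAux x c s is ≥ x (for a sorted x :: s)
theorem runsAux_keys_lb : ∀ (s : List Int) (x c k : Int),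
    List.Pairwise (· ≤ ·) (x :: s) → k ∈ (runsAux x c s).map Prod.fst → x ≤ k := by
  intro s
  induction s with
  | nil => intro x c k _ hk; simp [runsAux] at hk; omega
  | cons y ys ih =>
    intro x c k hp hk
    rw [List.pairwise_cons] at hp
    obtain ⟨hx, hp'⟩ := hp
    by_cases hyx : y = x
    · subst hyx
      simp only [runsAux, if_true] at hk
      exact ih y (c + 1) k hp' hk
    · simp only [runsAux, if_neg hyx, List.map_cons, List.mem_cons] at hk
      rcases hk with hk | hk
      · omega
      · have := ih y 1 k hp' hk
        have := hx y (by simp)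
        omega

-- the keys of runsAux are strictly increasing (for a sorted x :: s)
theorem runsAux_keys_lt : ∀ (s : List Int) (x c : Int),
    List.Pairwise (· ≤ ·) (x :: s) → ((runsAux x c s).map Prod.fst).Pairwise (· < ·) := by
  intro s
  induction s with
  | nil => intro x c _; simp [runsAux]
  | cons y ys ih =>
    intro x c hp
    rw [List.pairwise_cons] at hp
    obtain ⟨hx, hp'⟩ := hp
    by_cases hyx : y = x
    · subst hyx
      simp only [runsAux, if_true]
      exact ih y (c + 1) hp'
    · simp only [runsAux, if_neg hyx, List.map_cons]
      rw [List.pairwise_cons]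
      refine ⟨?_, ih y 1 hp'⟩
      intro k hk
      have h1 := runsAux_keys_lb ys y 1 k hp' hk
      have h2 := hx y (by simp)
      omega

-- counting the sorted remainder s with A's loop, starting from a dict d (keys < x)
-- to which (x, c) was just inserted, appends exactly the runs of x :: s
theorem foldl_step_runsAux : ∀ (s : List Int) (d : PySem.Dict Int Int) (x c : Int),
    List.Pairwise (· ≤ ·) (x :: s) → (∀ k ∈ d.keys, k < x) → d.keys.Nodup →
    (List.foldl pyStep (d.insert x c) s).items = d.items ++ runsAux x c s := by
  intro s
  induction s with
  | nil =>
    intro d x c _ hlt hnd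
    have hc : d.contains x = false := by
      rw [PySem.Dict.contains_eq_decide_mem_keys]
      simp only [decide_eq_false_iff_not]
      intro hm; exact absurd (hlt x hm) (lt_irrefl x)
    simp [runsAux, PySem.Dict.items_insert_of_not_contains _ _ hc]
  | cons y ys ih =>
    intro d x c hp hlt hnd
    rw [List.pairwise_cons] at hp
    obtain ⟨hx, hp'⟩ := hp
    by_cases hyx : y = x
    · subst hyx
      have hc : (d.insert y c).contains y = true := PySem.Dict.contains_insert_self _ _ _
      have hstep : pyStep (d.insert y c) y = d.insert y (c + 1) := by
        simp [pyStep, hc, PySem.Dict.getD_insert_self, PySem.Dict.insert_insert_self]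
      simp only [List.foldl_cons, hstep]
      rw [ih d y (c + 1) hp' hlt hnd]
      simp [runsAux]
    · have hxy : x < y := lt_of_le_of_ne (hx y (by simp)) (fun h => hyx h.symm)
      have hc : (d.insert x c).contains y = false := by
        rw [PySem.Dict.contains_eq_decide_mem_keys]
        simp only [decide_eq_false_iff_not, PySem.Dict.mem_keys_insert]
        rintro (rfl | hm)
        · exact absurd hxy (lt_irrefl y)
        · exact absurd (hlt y hm) (by omega)
      have hstep : pyStep (d.insert x c) y = (d.insert x c).insert y 1 := by
        simp [pyStep, hc]
      have hcx : d.contains x = false := by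
        rw [PySem.Dict.contains_eq_decide_mem_keys]
        simp only [decide_eq_false_iff_not]
        intro hm; exact absurd (hlt x hm) (lt_irrefl x)
      simp only [List.foldl_cons, hstep]
      rw [ih (d.insert x c) y 1 hp' ?_ (PySem.Dict.nodup_keys_insert _ _ _ hnd)]
      · rw [PySem.Dict.items_insert_of_not_contains _ _ hcx]
        simp [runsAux, hyx]
      · intro k hk
        rw [PySem.Dict.mem_keys_insert] at hk
        rcases hk with rfl | hk
        · exact hxy
        · have := hlt k hk; omega

-- A's whole loop over a sorted list produces exactly its run-length pairs
theorem foldl_step_eq_runs (s : List Int) (hp : List.Pairwise (· ≤ ·) s) :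
    (List.foldl pyStep PySem.Dict.empty s).items = runs s := by
  cases s with
  | nil => simp [runs, PySem.Dict.empty]
  | cons x xs =>
    have hstep : pyStep PySem.Dict.empty x = PySem.Dict.empty.insert x 1 := by
      simp [pyStep, PySem.Dict.contains_empty]
    simp only [List.foldl_cons, hstep]
    rw [foldl_step_runsAux xs PySem.Dict.empty x 1 hp (by simp [PySem.Dict.keys_empty])
      (by simp [PySem.Dict.keys_empty])]
    simp [runs, PySem.Dict.empty]

-- B's dict comprehension over the run pairs returns them unchanged (keys distinct)
theorem foldl_insert_runs (s : List Int) (hp : List.Pairwise (· ≤ ·) s) :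
    ((runs s).foldl (fun d p => d.insert p.1 p.2)
        (PySem.Dict.empty : PySem.Dict Int Int)).items = runs s := by
  have hnd : ((runs s).map Prod.fst).Nodup := by
    cases s with
    | nil => simp [runs]
    | cons x xs =>
      exact ((runsAux_keys_lt xs x 1 hp).imp fun h => Int.ne_of_lt h)
  have := PySem.Dict.items_foldl_insert_fresh (l := runs s) (k := Prod.fst) (v := Prod.snd)
    (d := PySem.Dict.empty) (by simp [PySem.Dict.contains_empty]) hnd
  simpa [PySem.Dict.empty] using this

-- ===== VERDICT (by name: the statement is the Claim_ definition above) =====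
theorem histogram_spec : Claim_equal_histogram := by
  intro ogen _
  unfold Spec_histogram histogram histogram_alt
  rw [foldl_step_eq_runs _ (PySem.List.sorted_pairwise ogen (fun x => x)),
    foldl_insert_runs _ (PySem.List.sorted_pairwise ogen (fun x => x))]
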